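-- pv_equiv track=rewrite | github.com/unxmaal/mogrix | mogrix/roadmap.py | _order_scc_greedy
-- ===== SOURCE A (Python) =====
-- def _order_scc_greedy(
--
--     scc: list[str],
--     adjacency: dict[str, list[str]],
--     reverse_adj: dict[str, list[str]],
-- ) -> list[str]:
--     """Order nodes within an SCC using a greedy heuristic.
--
--     Picks the node with the fewest unresolved deps (within the SCC) first.
--     This gives a reasonable build order for bootstrapping cycles:
--     the first package is the one to build with minimal deps, then its
--     dependents become unblocked, etc.
--     """
--     scc_set = set(scc)
--     remaining = set(scc)
--     resolved: set[str] = set()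
--     result: list[str] = []
--
--     while remaining:
--         # Count how many SCC-internal deps each remaining node has unresolved
--         best = None
--         best_count = float("inf")
--         for node in sorted(remaining):
--             # Count deps within SCC that haven't been "resolved" yet
--             unresolved = sum(
--                 1
--                 for dep in reverse_adj.get(node, [])
--                 if dep in scc_set and dep in remaining
--             )
--             if unresolved < best_count:
--                 best_count = unresolved
--                 best = node
--
--         if best is None:
--             break
--         result.append(best)
--         remaining.discard(best)
--         resolved.add(best)
--
--     return result
-- ===== SOURCE B (Python) =====
-- def _order_scc_greedy(
--     scc: list[str],
--     adjacency: dict[str, list[str]],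
--     reverse_adj: dict[str, list[str]],
-- ) -> list[str]:
--     """Same greedy order, but with incrementally maintained unresolved-dep
--     counts: counts are computed once, then updated via a dependents index
--     when a node is emitted, instead of re-scanning all dep lists each round."""
--     scc_set = set(scc)
--     remaining = set(scc)
--     count: dict[str, int] = {}
--     dependents: dict[str, list[str]] = {}
--     for node in scc_set:
--         c = 0
--         for dep in reverse_adj.get(node, []):
--             if dep in scc_set:
--                 c += 1
--                 dependents.setdefault(dep, []).append(node)
--         count[node] = c
--     result: list[str] = []
--     while remaining:
--         best = min(remaining, key=lambda n: (count[n], n))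
--         result.append(best)
--         remaining.discard(best)
--         for m in dependents.get(best, []):
--             if m in remaining:
--                 count[m] -= 1
--     return result
-- ===== Notes on version B (the rewrite author's own statement) =====
-- stated objective: alternative
-- what changed: Instead of re-sorting the remaining set and re-scanning every node's whole dep list on every round, B computes each node's unresolved-dep count once, builds a dependents index, maintains the counts incrementally when a node is emitted, and selects each round's node by a single min over (count, name) pairs.
import Mathlib
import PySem

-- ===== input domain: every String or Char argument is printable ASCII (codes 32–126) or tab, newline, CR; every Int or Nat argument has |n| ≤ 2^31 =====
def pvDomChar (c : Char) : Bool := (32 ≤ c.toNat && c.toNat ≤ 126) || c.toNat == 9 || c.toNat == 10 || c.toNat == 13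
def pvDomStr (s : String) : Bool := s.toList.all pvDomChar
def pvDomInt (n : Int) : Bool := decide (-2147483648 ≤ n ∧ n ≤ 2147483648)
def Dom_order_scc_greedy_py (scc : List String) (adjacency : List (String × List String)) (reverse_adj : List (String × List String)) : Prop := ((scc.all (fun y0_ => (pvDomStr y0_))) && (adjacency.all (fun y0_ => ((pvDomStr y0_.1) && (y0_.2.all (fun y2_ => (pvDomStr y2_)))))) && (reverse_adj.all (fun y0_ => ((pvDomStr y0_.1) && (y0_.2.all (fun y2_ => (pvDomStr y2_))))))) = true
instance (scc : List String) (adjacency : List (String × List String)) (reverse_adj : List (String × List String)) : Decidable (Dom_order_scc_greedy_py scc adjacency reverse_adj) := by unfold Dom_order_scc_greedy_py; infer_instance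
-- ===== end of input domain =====

-- B replaces A's per-round re-sort + full re-scan of all dep lists by counts computed
-- once, maintained incrementally through a dependents index, with a (count, name) min
-- selection per round.  A's dead 'resolved' set is not carried by either port (it never
-- affects the result).

-- ===== PORT A =====

-- sum(1 for dep in reverse_adj.get(node, []) if dep in scc_set and dep in remaining)
def pvA_unresolved (reverse_adj : List (String × List String)) (scc_set remaining : PySem.Set String) (node : String) : Int :=
  ((List.lookup node reverse_adj).getD []).foldl
    (fun acc dep => if PySem.Set.contains scc_set dep && PySem.Set.contains remaining dep then acc + 1 else acc) 0

-- the 'for node in sorted(remaining)' best/best_count scan; best_count none = float("inf")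
def pvA_select (reverse_adj : List (String × List String)) (scc_set remaining : PySem.Set String) : Option String × Option Int :=
  (PySem.List.sorted remaining (fun x => x) false).foldl
    (fun st node =>
      let unresolved := pvA_unresolved reverse_adj scc_set remaining node
      match st.2 with
      | none => (some node, some unresolved)
      | some bc => if unresolved < bc then (some node, some unresolved) else st)
    (none, none)

lemma pvA_select_fst_mem (reverse_adj : List (String × List String)) (scc_set remaining : PySem.Set String)
    (b : String) (c : Option Int) (h : pvA_select reverse_adj scc_set remaining = (some b, c)) :
    b ∈ remaining := by
  have key : ∀ (l : List String) (st : Option String × Option Int),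
      (∀ x, st.1 = some x → x ∈ remaining) → (∀ x ∈ l, x ∈ remaining) →
      ∀ x, (l.foldl (fun st node =>
        let unresolved := pvA_unresolved reverse_adj scc_set remaining node
        match st.2 with
        | none => (some node, some unresolved)
        | some bc => if unresolved < bc then (some node, some unresolved) else st) st).1 = some x → x ∈ remaining := by
    intro l
    induction l with
    | nil => intro st h1 _ x hx; exact h1 x hx
    | cons a t ih =>
      intro st h1 h2 x hx
      refine ih _ ?_ (fun y hy => h2 y (List.mem_cons_of_mem _ hy)) x hx
      intro y hy
      dsimp at hy
      rcases hst : st.2 with _ | bc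
      · rw [hst] at hy; simp at hy; subst hy; exact h2 a (List.mem_cons_self)
      · rw [hst] at hy; dsimp at hy
        split at hy
        · simp at hy; subst hy; exact h2 a (List.mem_cons_self)
        · exact h1 y hy
  have := key (PySem.List.sorted remaining (fun x => x) false) (none, none)
    (by intro x hx; simp at hx) (by intro x hx; exact (PySem.List.mem_sorted _ _ _ _).mp hx) b
  apply this
  rw [pvA_select] at h
  rw [h]

lemma pv_discard_lt (remaining : PySem.Set String) (b : String) (hb : b ∈ remaining) :
    (PySem.Set.discard remaining b).length < remaining.length := by
  have : (List.filter (fun y => !y == b) remaining).length < remaining.length := by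
    rw [List.length_filter_lt_length_iff_exists]
    exact ⟨b, hb, by simp⟩
  simpa [PySem.Set.discard] using this

-- the 'while remaining:' loop
def pvA_loop (reverse_adj : List (String × List String)) (scc_set : PySem.Set String)
    (remaining : PySem.Set String) (result : List String) : List String :=
  if hne : remaining = [] then result
  else
    match hsel : pvA_select reverse_adj scc_set remaining with
    | (none, _) => result
    | (some best, _) =>
      pvA_loop reverse_adj scc_set (PySem.Set.discard remaining best) (result ++ [best])
termination_by remaining.length
decreasing_by
  exact pv_discard_lt remaining best (pvA_select_fst_mem _ _ _ _ _ hsel)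

def order_scc_greedy_py (scc : List String) (adjacency : List (String × List String)) (reverse_adj : List (String × List String)) : List String :=
  let scc_set := PySem.Set.ofList scc
  let remaining := PySem.Set.ofList scc
  pvA_loop reverse_adj scc_set remaining []

-- ===== PORT B =====

-- the initial pass: count[node] and the dependents index (setdefault/append = modify … (· ++ [node]))
def pvB_init (scc_set : PySem.Set String) (reverse_adj : List (String × List String)) :
    PySem.Dict String Int × PySem.Dict String (List String) :=
  scc_set.foldl
    (fun st node =>
      let inner := ((List.lookup node reverse_adj).getD []).foldl
        (fun (p : Int × PySem.Dict String (List String)) dep =>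
          if PySem.Set.contains scc_set dep then (p.1 + 1, p.2.modify dep [] (· ++ [node])) else p)
        (0, st.2)
      (st.1.insert node inner.1, inner.2))
    (PySem.Dict.empty, PySem.Dict.empty)

lemma pvB_min2_mem {α : Type} (l : List α) (k1 : α → Int) (k2 : α → String) (b : α)
    (h : PySem.List.min2? l k1 k2 = some b) : b ∈ l := by
  have key : ∀ (l' : List α) (st : Option α), (∀ x, st = some x → x ∈ l) → (∀ x ∈ l', x ∈ l) →
      ∀ x, l'.foldl (fun acc x =>
        match acc with
        | none => some x
        | some m => if (decide (k1 x < k1 m) || !decide (k1 m < k1 x) && decide (k2 x < k2 m)) = true then some x else some m) st = some x → x ∈ l := by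
    intro l'
    induction l' with
    | nil => intro st h1 _ x hx; exact h1 x hx
    | cons a t ih =>
      intro st h1 h2 x hx
      refine ih _ ?_ (fun y hy => h2 y (List.mem_cons_of_mem _ hy)) x hx
      intro y hy
      rcases st with _ | m
      · simp at hy; subst hy; exact h2 a List.mem_cons_self
      · dsimp at hy
        split at hy
        · simp at hy; subst hy; exact h2 a List.mem_cons_self
        · exact h1 y hy
  exact key l none (by simp) (fun x hx => hx) b h

-- the 'while remaining:' loop of B
def pvB_loop (dependents : PySem.Dict String (List String))
    (remaining : PySem.Set String) (count : PySem.Dict String Int) (result : List String) : List String :=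
  if hne : remaining = [] then result
  else
    match hsel : PySem.List.min2? remaining (fun n => count.getD n 0) (fun n => n) with
    | none => result
    | some best =>
      let rem' := PySem.Set.discard remaining best
      let count' := (dependents.getD best []).foldl
        (fun c m => if PySem.Set.contains rem' m then c.modify m 0 (· - 1) else c) count
      pvB_loop dependents rem' count' (result ++ [best])
termination_by remaining.length
decreasing_by
  exact pv_discard_lt remaining best (pvB_min2_mem _ _ _ _ hsel)

def order_scc_greedy_py_alt (scc : List String) (adjacency : List (String × List String)) (reverse_adj : List (String × List String)) : List String :=
  let scc_set := PySem.Set.ofList scc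
  let remaining := PySem.Set.ofList scc
  let init := pvB_init scc_set reverse_adj
  pvB_loop init.2 remaining init.1 []

-- ===== PRECONDITION & SPEC =====
def Spec_order_scc_greedy_py (scc : List String) (adjacency : List (String × List String)) (reverse_adj : List (String × List String)) (out : List String) : Prop := out = order_scc_greedy_py_alt scc adjacency reverse_adj
instance (scc : List String) (adjacency : List (String × List String)) (reverse_adj : List (String × List String)) (out : List String) : Decidable (Spec_order_scc_greedy_py scc adjacency reverse_adj out) := by unfold Spec_order_scc_greedy_py; infer_instance

-- ===== CLAIM (what is proved, stated in full; the proofs are below) =====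
def Claim_equal_order_scc_greedy_py : Prop := ∀ (scc : List String) (adjacency : List (String × List String)) (reverse_adj : List (String × List String)), Dom_order_scc_greedy_py scc adjacency reverse_adj → Spec_order_scc_greedy_py scc adjacency reverse_adj (order_scc_greedy_py scc adjacency reverse_adj)

-- ===== LEMMAS AND PROOFS =====

-- abbreviation for the count A recomputes each round
def pvCnt (ra : List (String × List String)) (ss rem : PySem.Set String) (n : String) : Int :=
  (((List.lookup n ra).getD []).countP (fun d => PySem.Set.contains ss d && PySem.Set.contains rem d) : Int)

-- lexicographic order on (f n, n) pairs
def pvLexLt (f : String → Int) (a b : String) : Prop := f a < f b ∨ (f a = f b ∧ a < b)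
def pvLexLe (f : String → Int) (a b : String) : Prop := f a < f b ∨ (f a = f b ∧ a ≤ b)

lemma pvLexLe_refl (f : String → Int) (a : String) : pvLexLe f a a := Or.inr ⟨rfl, le_refl a⟩

lemma pvLexLe_trans {f : String → Int} {a b c : String} (h1 : pvLexLe f a b) (h2 : pvLexLe f b c) :
    pvLexLe f a c := by
  rcases h1 with h1 | ⟨h1, h1'⟩ <;> rcases h2 with h2 | ⟨h2, h2'⟩
  · exact Or.inl (lt_trans h1 h2)
  · exact Or.inl (h2 ▸ h1)
  · exact Or.inl (h1 ▸ h2)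
  · exact Or.inr ⟨h1.trans h2, le_trans h1' h2'⟩

lemma pvLexLe_of_lt {f : String → Int} {a b : String} (h : pvLexLt f a b) : pvLexLe f a b := by
  rcases h with h | ⟨h, h'⟩
  · exact Or.inl h
  · exact Or.inr ⟨h, le_of_lt h'⟩

lemma pvLexLe_of_not_lt {f : String → Int} {a b : String} (h : ¬ pvLexLt f a b) : pvLexLe f b a := by
  unfold pvLexLt at h
  push_neg at h
  rcases lt_or_eq_of_le h.1 with hf | hf
  · exact Or.inl hf
  · exact Or.inr ⟨hf, h.2 hf.symm⟩

lemma pvLex_eq_of_le_not_lt {f : String → Int} {a b : String}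
    (h1 : pvLexLe f a b) (h2 : ¬ pvLexLt f a b) : a = b := by
  unfold pvLexLt at h2
  push_neg at h2
  rcases h1 with h | ⟨h, h'⟩
  · exact absurd h (not_lt.mpr h2.1)
  · exact le_antisymm h' (h2.2 h)

lemma pvLexLt_of_le_of_lt {f : String → Int} {a b c : String}
    (h1 : pvLexLe f a b) (h2 : pvLexLt f b c) : pvLexLt f a c := by
  rcases h1 with h1 | ⟨h1, h1'⟩ <;> rcases h2 with h2 | ⟨h2, h2'⟩
  · exact Or.inl (lt_trans h1 h2)
  · exact Or.inl (h2 ▸ h1)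
  · exact Or.inl (h1 ▸ h2)
  · exact Or.inr ⟨h1.trans h2, lt_of_le_of_lt h1' h2'⟩

-- A's inner sum equals the countP form
lemma pvA_unresolved_eq_cnt (ra : List (String × List String)) (ss rem : PySem.Set String) (n : String) :
    pvA_unresolved ra ss rem n = pvCnt ra ss rem n := by
  unfold pvA_unresolved pvCnt
  rw [PySem.List.foldl_if_add_one]
  simp

-- the step function of A's best/best_count scan
def pvStep (f : String → Int) (st : Option String × Option Int) (node : String) : Option String × Option Int :=
  let u := f node
  match st.2 with
  | none => (some node, some u)
  | some bc => if u < bc then (some node, some u) else st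

lemma pvStep_fold_spec (f : String → Int) :
    ∀ (l : List String) (b : String), (∀ y ∈ l, b < y) → l.Pairwise (· < ·) →
    ∃ b', (l.foldl (pvStep f) (some b, some (f b))) = (some b', some (f b')) ∧
      (b' = b ∨ b' ∈ l) ∧ pvLexLe f b' b ∧ ∀ y ∈ l, pvLexLe f b' y := by
  intro l
  induction l with
  | nil => intro b _ _; exact ⟨b, rfl, Or.inl rfl, pvLexLe_refl f b, by simp⟩
  | cons a t ih =>
    intro b hmin hpw
    have hba : b < a := hmin a List.mem_cons_self
    have hpw' : t.Pairwise (· < ·) := (List.pairwise_cons.mp hpw).2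
    have hat : ∀ y ∈ t, a < y := (List.pairwise_cons.mp hpw).1
    rw [List.foldl_cons]
    by_cases hlt : f a < f b
    · have hstep : pvStep f (some b, some (f b)) a = (some a, some (f a)) := by
        simp [pvStep, hlt]
      rw [hstep]
      obtain ⟨b', heq, hmem, hle, hall⟩ := ih a hat hpw'
      refine ⟨b', heq, ?_, pvLexLe_trans hle (Or.inl hlt), ?_⟩
      · rcases hmem with h | h
        · exact Or.inr (h ▸ List.mem_cons_self)
        · exact Or.inr (List.mem_cons_of_mem _ h)
      · intro y hy
        rcases List.mem_cons.mp hy with h | h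
        · exact h ▸ hle
        · exact hall y h
    · have hstep : pvStep f (some b, some (f b)) a = (some b, some (f b)) := by
        simp [pvStep, hlt]
      rw [hstep]
      obtain ⟨b', heq, hmem, hle, hall⟩ := ih b (fun y hy => hmin y (List.mem_cons_of_mem _ hy)) hpw'
      refine ⟨b', heq, ?_, hle, ?_⟩
      · rcases hmem with h | h
        · exact Or.inl h
        · exact Or.inr (List.mem_cons_of_mem _ h)
      · intro y hy
        rcases List.mem_cons.mp hy with h | h
        · subst h
          have hba' : pvLexLe f b y := by
            rcases lt_or_eq_of_le (not_lt.mp hlt) with hf | hf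
            · exact Or.inl hf
            · exact Or.inr ⟨hf.symm ▸ hf, le_of_lt hba⟩
          exact pvLexLe_trans hle hba'
        · exact hall y h

lemma pvA_select_spec (ra : List (String × List String)) (ss rem : PySem.Set String)
    (hnd : rem.Nodup) (hne : rem ≠ []) :
    ∃ b c, b ∈ rem ∧ pvA_select ra ss rem = (some b, c) ∧
      ∀ y ∈ rem, pvLexLe (pvCnt ra ss rem) b y := by
  have hfun : (fun n => pvA_unresolved ra ss rem n) = pvCnt ra ss rem :=
    funext (fun n => pvA_unresolved_eq_cnt ra ss rem n)
  have hl : PySem.List.sorted rem (fun x => x) false ≠ [] := by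
    rw [Ne, PySem.List.sorted_eq_nil_iff]; exact hne
  have hnd' : (PySem.List.sorted rem (fun x => x) false).Nodup :=
    ((PySem.List.sorted_perm rem (fun x => x) false).nodup_iff).mpr hnd
  have hle' : (PySem.List.sorted rem (fun x => x) false).Pairwise (fun a b => a ≤ b) :=
    PySem.List.sorted_pairwise rem (fun x => x)
  have hpw : (PySem.List.sorted rem (fun x => x) false).Pairwise (· < ·) :=
    (hle'.and hnd').imp (fun h => lt_of_le_of_ne h.1 h.2)
  have hsel : pvA_select ra ss rem =
      (PySem.List.sorted rem (fun x => x) false).foldl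
        (pvStep (fun n => pvA_unresolved ra ss rem n)) (none, none) := rfl
  rcases hlcases : PySem.List.sorted rem (fun x => x) false with _ | ⟨a, t⟩
  · exact absurd hlcases hl
  · rw [hlcases] at hpw hnd'
    have hat : ∀ y ∈ t, a < y := (List.pairwise_cons.mp hpw).1
    have hpw' : t.Pairwise (· < ·) := (List.pairwise_cons.mp hpw).2
    obtain ⟨b', heq, hmem, hlea, hall⟩ :=
      pvStep_fold_spec (fun n => pvA_unresolved ra ss rem n) t a hat hpw'
    refine ⟨b', some (pvA_unresolved ra ss rem b'), ?_, ?_, ?_⟩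
    · have : b' ∈ a :: t := by
        rcases hmem with h | h
        · exact h ▸ List.mem_cons_self
        · exact List.mem_cons_of_mem _ h
      rw [← hlcases] at this
      exact (PySem.List.mem_sorted _ _ _ _).mp this
    · rw [hsel, hlcases, List.foldl_cons]
      have h1 : pvStep (fun n => pvA_unresolved ra ss rem n) (none, none) a
          = (some a, some (pvA_unresolved ra ss rem a)) := rfl
      rw [h1, heq]
    · intro y hy
      rw [← hfun]
      have : y ∈ a :: t := by
        rw [← hlcases, PySem.List.mem_sorted]; exact hy
      rcases List.mem_cons.mp this with h | h
      · exact h ▸ hlea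
      · exact hall y h

-- characterisation of min2? (B's min over (count, name) pairs)
lemma pvLexLt_irrefl (k : String → Int) (a : String) : ¬ pvLexLt k a a := by
  rintro (h | ⟨_, h⟩) <;> exact lt_irrefl _ h

-- the step function of min2? with an identity second key
def pvBstep (k : String → Int) (acc : Option String) (x : String) : Option String :=
  match acc with
  | none => some x
  | some m => if (decide (k x < k m) || !decide (k m < k x) && decide (x < m)) = true then some x else some m

lemma pvBstep_iff (k : String → Int) (m x : String) :
    (decide (k x < k m) || !decide (k m < k x) && decide (x < m)) = true ↔ pvLexLt k x m := by
  have hiff : (decide (k x < k m) || !decide (k m < k x) && decide (x < m)) = true ↔ pvLexLt k x m := by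
    simp only [Bool.or_eq_true, Bool.and_eq_true, Bool.not_eq_true', decide_eq_true_eq,
      decide_eq_false_iff_not, pvLexLt]
    constructor
    · rintro (h | ⟨h1, h2⟩)
      · exact Or.inl h
      · rcases lt_trichotomy (k x) (k m) with h' | h' | h'
        · exact Or.inl h'
        · exact Or.inr ⟨h', h2⟩
        · exact absurd h' h1
    · rintro (h | ⟨h1, h2⟩)
      · exact Or.inl h
      · exact Or.inr ⟨by rw [h1]; exact lt_irrefl _, h2⟩
  exact hiff

lemma pvBstep_fold_spec (k : String → Int) :
    ∀ (l : List String) (m : String),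
    ∃ b, l.foldl (pvBstep k) (some m) = some b ∧ (b = m ∨ b ∈ l) ∧
      ¬ pvLexLt k m b ∧ ∀ y ∈ l, ¬ pvLexLt k y b := by
  intro l
  induction l with
  | nil => intro m; exact ⟨m, rfl, Or.inl rfl, pvLexLt_irrefl k m, by simp⟩
  | cons a t ih =>
    intro m
    rw [List.foldl_cons]
    by_cases hlt : pvLexLt k a m
    · have hstep : pvBstep k (some m) a = some a := by
        unfold pvBstep
        show (if (decide (k a < k m) || !decide (k m < k a) && decide (a < m)) = true then some a else some m) = some a
        rw [if_pos (pvBstep_iff k m a |>.mpr hlt)]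
      rw [hstep]
      obtain ⟨b, heq, hmem, hnm, hall⟩ := ih a
      refine ⟨b, heq, ?_, ?_, ?_⟩
      · rcases hmem with h | h
        · exact Or.inr (h ▸ List.mem_cons_self)
        · exact Or.inr (List.mem_cons_of_mem _ h)
      · intro hmb
        exact hnm (pvLexLt_of_le_of_lt (pvLexLe_of_lt hlt) hmb)
      · intro y hy
        rcases List.mem_cons.mp hy with h | h
        · exact h ▸ hnm
        · exact hall y h
    · have hstep : pvBstep k (some m) a = some m := by
        unfold pvBstep
        show (if (decide (k a < k m) || !decide (k m < k a) && decide (a < m)) = true then some a else some m) = some m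
        rw [if_neg (fun hb => hlt (pvBstep_iff k m a |>.mp hb))]
      rw [hstep]
      obtain ⟨b, heq, hmem, hnm, hall⟩ := ih m
      refine ⟨b, heq, ?_, hnm, ?_⟩
      · rcases hmem with h | h
        · exact Or.inl h
        · exact Or.inr (List.mem_cons_of_mem _ h)
      · intro y hy
        rcases List.mem_cons.mp hy with h | h
        · subst h
          intro hab
          exact hnm (pvLexLt_of_le_of_lt (pvLexLe_of_not_lt hlt) hab)
        · exact hall y h

lemma pvB_min2_spec (k : String → Int) (l : List String) (hne : l ≠ []) :
    ∃ m, PySem.List.min2? l k (fun n => n) = some m ∧ m ∈ l ∧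
      ∀ y ∈ l, ¬ pvLexLt k y m := by
  have hdef : PySem.List.min2? l k (fun n => n) = l.foldl (pvBstep k) none := by
    unfold PySem.List.min2?
    congr 1
    funext acc x
    cases acc <;> rfl
  rcases l with _ | ⟨a, t⟩
  · exact absurd rfl hne
  · rw [hdef, List.foldl_cons]
    have h1 : pvBstep k none a = some a := rfl
    rw [h1]
    obtain ⟨b, heq, hmem, hnm, hall⟩ := pvBstep_fold_spec k t a
    refine ⟨b, heq, ?_, ?_⟩
    · rcases hmem with h | h
      · exact h ▸ List.mem_cons_self
      · exact List.mem_cons_of_mem _ h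
    · intro y hy
      rcases List.mem_cons.mp hy with h | h
      · exact h ▸ hnm
      · exact hall y h

-- loop step lemmas (unfold one iteration of each WF loop)
lemma pvA_loop_nil (ra : List (String × List String)) (ss : PySem.Set String) (result : List String) :
    pvA_loop ra ss [] result = result := by
  rw [pvA_loop]
  simp

lemma pvA_loop_step (ra : List (String × List String)) (ss rem : PySem.Set String)
    (result : List String) (b : String) (c : Option Int) (hne : rem ≠ [])
    (hsel : pvA_select ra ss rem = (some b, c)) :
    pvA_loop ra ss rem result = pvA_loop ra ss (PySem.Set.discard rem b) (result ++ [b]) := by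
  rw [pvA_loop]
  split
  · exact absurd (by assumption) hne
  · split
    · next heq => rw [hsel] at heq; cases heq
    · next best _ heq => rw [hsel] at heq; cases heq; rfl

lemma pvB_loop_nil (deps : PySem.Dict String (List String)) (count : PySem.Dict String Int) (result : List String) :
    pvB_loop deps [] count result = result := by
  rw [pvB_loop]
  simp

lemma pvB_loop_step (deps : PySem.Dict String (List String)) (rem : PySem.Set String)
    (count : PySem.Dict String Int) (result : List String) (b : String) (hne : rem ≠ [])
    (hsel : PySem.List.min2? rem (fun n => count.getD n 0) (fun n => n) = some b) :
    pvB_loop deps rem count result =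
      pvB_loop deps (PySem.Set.discard rem b)
        ((deps.getD b []).foldl
          (fun c m => if PySem.Set.contains (PySem.Set.discard rem b) m then c.modify m 0 (· - 1) else c) count)
        (result ++ [b]) := by
  rw [pvB_loop]
  split
  · exact absurd (by assumption) hne
  · split
    · next heq => rw [hsel] at heq; cases heq
    · next best heq => rw [hsel] at heq; cases heq; rfl

-- decrement loop: pointwise effect on getD
lemma pv_getD_foldl_sub (l : List String) (d : PySem.Dict String Int) (v : String) :
    (l.foldl (fun c m => c.modify m 0 (· - 1)) d).getD v 0 = d.getD v 0 - l.count v := by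
  induction l generalizing d with
  | nil => simp
  | cons a t ih =>
    rw [List.foldl_cons, ih, PySem.Dict.getD_modify]
    rw [List.count_cons]
    by_cases hv : v = a
    · simp [hv]; omega
    · simp [hv, Ne.symm hv]

-- counting loop: foldl (+1) is the length
lemma pv_foldl_len (l : List String) (c : Int) : l.foldl (fun a _ => a + 1) c = c + l.length := by
  induction l generalizing c with
  | nil => simp
  | cons x t ih =>
    rw [List.foldl_cons, ih, List.length_cons]
    push_cast
    omega

lemma pv_replicate (l : List String) (node b : String) :
    ((l.map (fun e => (e, node))).filter (fun p => p.1 == b)).map (fun p => p.2)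
      = List.replicate (l.count b) node := by
  induction l with
  | nil => simp
  | cons x t ih =>
    by_cases hxb : x = b
    · subst hxb
      simp [List.count_cons, ih, List.replicate_succ]
    · simp [List.count_cons, hxb, ih, Ne.symm hxb]

lemma pv_modify_app (l : List String) (node : String) (d : PySem.Dict String (List String)) (b : String) :
    (l.foldl (fun d e => d.modify e [] (· ++ [node])) d).getD b []
      = d.getD b [] ++ List.replicate (l.count b) node := by
  have h1 : l.foldl (fun d e => d.modify e [] (· ++ [node])) d
      = (l.map (fun e => (e, node))).foldl (fun d p => d.modify p.1 [] (· ++ [p.2])) d := by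
    rw [List.foldl_map]
  rw [h1, PySem.Dict.getD_foldl_modify_append, pv_replicate]

-- the outer step of pvB_init, named so the fold can be characterised
def pvOuter (ss : PySem.Set String) (ra : List (String × List String))
    (st : PySem.Dict String Int × PySem.Dict String (List String)) (node : String) :
    PySem.Dict String Int × PySem.Dict String (List String) :=
  let inner := ((List.lookup node ra).getD []).foldl
    (fun (p : Int × PySem.Dict String (List String)) dep =>
      if PySem.Set.contains ss dep then (p.1 + 1, p.2.modify dep [] (· ++ [node])) else p)
    (0, st.2)
  (st.1.insert node inner.1, inner.2)

lemma pvB_init_eq_fold (ss : PySem.Set String) (ra : List (String × List String)) :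
    pvB_init ss ra = ss.foldl (pvOuter ss ra) (PySem.Dict.empty, PySem.Dict.empty) := rfl

lemma pvOuter_spec (ss : PySem.Set String) (ra : List (String × List String))
    (st : PySem.Dict String Int × PySem.Dict String (List String)) (node : String) :
    pvOuter ss ra st node =
      (st.1.insert node (((List.lookup node ra).getD []).countP (fun d => PySem.Set.contains ss d) : Int),
       (((List.lookup node ra).getD []).filter (fun d => PySem.Set.contains ss d)).foldl
         (fun d e => d.modify e [] (· ++ [node])) st.2) := by
  unfold pvOuter
  rw [PySem.List.foldl_if_eq_foldl_filter (p := fun dep => PySem.Set.contains ss dep)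
        (f := fun (p : Int × PySem.Dict String (List String)) dep => (p.1 + 1, p.2.modify dep [] (· ++ [node])))]
  rw [PySem.List.foldl_prod_mk (f := fun (a : Int) (_ : String) => a + 1)
        (g := fun (d : PySem.Dict String (List String)) e => d.modify e [] (· ++ [node]))]
  rw [pv_foldl_len, List.countP_eq_length_filter]
  simp

lemma pvB_init_fold (ss : PySem.Set String) (ra : List (String × List String)) :
    ∀ (L : List String) (st : PySem.Dict String Int × PySem.Dict String (List String)), L.Nodup →
    (∀ n : String, (L.foldl (pvOuter ss ra) st).1.getD n 0
        = if n ∈ L then (((List.lookup n ra).getD []).countP (fun d => PySem.Set.contains ss d) : Int)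
          else st.1.getD n 0)
    ∧ (∀ b n : String, ((L.foldl (pvOuter ss ra) st).2.getD b []).count n
        = (st.2.getD b []).count n
          + (if n ∈ L then (((List.lookup n ra).getD []).filter (fun d => PySem.Set.contains ss d)).count b else 0)) := by
  intro L
  induction L with
  | nil => intro st _; constructor <;> simp
  | cons a L' ih =>
    intro st hnd
    have ha : a ∉ L' := (List.nodup_cons.mp hnd).1
    have hnd' : L'.Nodup := (List.nodup_cons.mp hnd).2
    rw [List.foldl_cons, pvOuter_spec]
    obtain ⟨ih1, ih2⟩ := ih _ hnd'
    constructor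
    · intro n
      rw [ih1 n]
      by_cases hL : n ∈ L'
      · simp [hL, List.mem_cons.mpr (Or.inr hL)]
      · by_cases hna : n = a
        · subst hna
          simp [hL, PySem.Dict.getD_insert]
        · simp [hL, hna, PySem.Dict.getD_insert]
    · intro b n
      rw [ih2 b n]
      dsimp only
      rw [pv_modify_app, List.count_append, List.count_replicate]
      by_cases hL : n ∈ L'
      · have hna : n ≠ a := fun h => ha (h ▸ hL)
        simp [hL, List.mem_cons.mpr (Or.inr hL), hna, Ne.symm hna]
      · by_cases hna : n = a
        · subst hna
          simp [hL]
        · simp [hL, hna, Ne.symm hna]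

-- the initial counts computed by pvB_init
lemma pvB_init_count (ss : PySem.Set String) (ra : List (String × List String)) (hnd : ss.Nodup)
    (n : String) (hn : n ∈ ss) :
    (pvB_init ss ra).1.getD n 0 = (((List.lookup n ra).getD []).countP (fun d => PySem.Set.contains ss d) : Int) := by
  rw [pvB_init_eq_fold]
  rw [(pvB_init_fold ss ra ss (PySem.Dict.empty, PySem.Dict.empty) hnd).1 n]
  simp [hn]

-- the dependents index computed by pvB_init (multiplicities)
lemma pvB_init_deps (ss : PySem.Set String) (ra : List (String × List String)) (hnd : ss.Nodup)
    (n : String) (hn : n ∈ ss) (b : String) :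
    ((pvB_init ss ra).2.getD b []).count n
      = (((List.lookup n ra).getD []).filter (fun d => PySem.Set.contains ss d)).count b := by
  rw [pvB_init_eq_fold]
  rw [(pvB_init_fold ss ra ss (PySem.Dict.empty, PySem.Dict.empty) hnd).2 b n]
  simp [hn]

-- removing b from remaining lowers each count by the number of occurrences of b
lemma pvCnt_discard (ra : List (String × List String)) (ss rem : PySem.Set String)
    (b : String) (hb : b ∈ rem) (hbss : b ∈ ss) (n : String) :
    pvCnt ra ss rem n = pvCnt ra ss (PySem.Set.discard rem b) n + ((List.lookup n ra).getD []).count b := by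
  have hcb : PySem.Set.contains ss b = true := (PySem.Set.contains_iff ss b).mpr hbss
  have hrb : PySem.Set.contains rem b = true := (PySem.Set.contains_iff rem b).mpr hb
  have hdb : PySem.Set.contains (PySem.Set.discard rem b) b = false := by
    rw [← Bool.not_eq_true]
    intro h
    exact ((PySem.Set.mem_discard _ _ _).mp ((PySem.Set.contains_iff _ _).mp h)).2 rfl
  have hother : ∀ d, d ≠ b → PySem.Set.contains (PySem.Set.discard rem b) d = PySem.Set.contains rem d := by
    intro d hd
    by_cases hmem : d ∈ rem
    · rw [(PySem.Set.contains_iff _ _).mpr ((PySem.Set.mem_discard _ _ _).mpr ⟨hmem, hd⟩),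
          (PySem.Set.contains_iff _ _).mpr hmem]
    · have e1 : PySem.Set.contains (PySem.Set.discard rem b) d = false := by
        rw [← Bool.not_eq_true]
        exact fun h => hmem ((PySem.Set.mem_discard _ _ _).mp ((PySem.Set.contains_iff _ _).mp h)).1
      have e2 : PySem.Set.contains rem d = false := by
        rw [← Bool.not_eq_true]
        exact fun h => hmem ((PySem.Set.contains_iff _ _).mp h)
      rw [e1, e2]
  have key : ∀ ds : List String,
      ds.countP (fun d => PySem.Set.contains ss d && PySem.Set.contains rem d)
        = ds.countP (fun d => PySem.Set.contains ss d && PySem.Set.contains (PySem.Set.discard rem b) d)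
          + ds.count b := by
    intro ds
    induction ds with
    | nil => simp
    | cons d t iht =>
      simp only [List.countP_cons, List.count_cons]
      by_cases hd : d = b
      · subst hd
        rw [iht]
        simp [hdb, hb, hbss]
        try omega
      · rw [hother d hd, iht]
        have h1 : (b == d) = false := by simp [Ne.symm hd]
        have h2 : (d == b) = false := by simp [hd]
        simp [h1, h2]
        omega
  unfold pvCnt
  rw [key ((List.lookup n ra).getD [])]
  push_cast
  ring

-- the main loop equivalence, by strong induction on |remaining|
lemma pv_loops_eq (ra : List (String × List String)) (ss : PySem.Set String) (hssnd : ss.Nodup) :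
    ∀ (k : Nat) (rem : PySem.Set String) (count : PySem.Dict String Int) (result : List String),
    rem.length = k → rem.Nodup → (∀ n ∈ rem, n ∈ ss) →
    (∀ n ∈ rem, count.getD n 0 = pvCnt ra ss rem n) →
    pvA_loop ra ss rem result = pvB_loop (pvB_init ss ra).2 rem count result := by
  intro k
  induction k using Nat.strong_induction_on with
  | _ k IH =>
    intro rem count result hlen hnd hsub hinv
    by_cases hne : rem = []
    · subst hne
      rw [pvA_loop_nil, pvB_loop_nil]
    · obtain ⟨b, c, hbmem, hAsel, hAmin⟩ := pvA_select_spec ra ss rem hnd hne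
      obtain ⟨m, hBsel, hmmem, hBmin⟩ := pvB_min2_spec (fun n => count.getD n 0) rem hne
      have hbm : b = m := by
        apply pvLex_eq_of_le_not_lt (hAmin m hmmem)
        intro hlt
        apply hBmin b hbmem
        unfold pvLexLt at hlt ⊢
        simp only [hinv b hbmem, hinv m hmmem]
        exact hlt
      subst hbm
      rw [pvA_loop_step ra ss rem result b c hne hAsel,
          pvB_loop_step (pvB_init ss ra).2 rem count result b hne hBsel]
      have hlt' : (PySem.Set.discard rem b).length < k := hlen ▸ pv_discard_lt rem b hbmem
      apply IH (PySem.Set.discard rem b).length hlt' (PySem.Set.discard rem b) _ (result ++ [b]) rfl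
          (PySem.Set.nodup_discard rem b hnd)
          (fun n hn => hsub n ((PySem.Set.mem_discard _ _ _).mp hn).1)
      intro n hn
      have hnrem : n ∈ rem := ((PySem.Set.mem_discard _ _ _).mp hn).1
      have hnss : n ∈ ss := hsub n hnrem
      have hcontn : PySem.Set.contains (PySem.Set.discard rem b) n = true :=
        (PySem.Set.contains_iff _ _).mpr hn
      rw [PySem.List.foldl_if_eq_foldl_filter
            (p := fun m => PySem.Set.contains (PySem.Set.discard rem b) m)
            (f := fun (c : PySem.Dict String Int) m => c.modify m 0 (· - 1))]
      rw [pv_getD_foldl_sub, List.count_filter hcontn]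
      rw [pvB_init_deps ss ra hssnd n hnss b]
      rw [List.count_filter ((PySem.Set.contains_iff ss b).mpr (hsub b hbmem))]
      rw [hinv n hnrem]
      have hrec := pvCnt_discard ra ss rem b hbmem (hsub b hbmem) n
      omega

-- ===== VERDICT (by name: the statement is the Claim_ definition above) =====
theorem order_scc_greedy_py_spec : Claim_equal_order_scc_greedy_py := by
  unfold Claim_equal_order_scc_greedy_py
  intro scc adjacency reverse_adj _
  unfold Spec_order_scc_greedy_py order_scc_greedy_py order_scc_greedy_py_alt
  apply pv_loops_eq reverse_adj (PySem.Set.ofList scc) (PySem.Set.nodup_ofList scc)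
    (PySem.Set.ofList scc).length _ _ _ rfl (PySem.Set.nodup_ofList scc) (fun n hn => hn)
  intro n hn
  rw [pvB_init_count _ _ (PySem.Set.nodup_ofList scc) n hn]
  unfold pvCnt
  congr 1
  apply List.countP_congr
  intro d _
  by_cases hd : PySem.Set.contains (PySem.Set.ofList scc) d = true <;> simp [hd]
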